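-- pv_equiv track=rewrite | github.com/wsweishang/Code-Repository | python_script_practice/web_crawler_download/mrcong_web_crawler_test.py | calc_divisional_range
-- ===== SOURCE A (Python) =====
-- def calc_divisional_range(filesize, chuck = 10):
--     step = filesize // chuck
--     arr, result = [], []
--     for i in range(chuck) :
--         arr.append(i * step)
--
--     arr.append(filesize)
--
--     for i in range(len(arr) - 1):
--         s_pos, e_pos = arr[i], arr[i + 1] - 1
--         result.append([s_pos, e_pos])
--     return result
-- ===== SOURCE B (Python) =====
-- def calc_divisional_range(filesize, chuck = 10):
--     step = filesize // chuck
--     result = []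
--     end = filesize - 1
--     i = chuck - 1
--     while i >= 0:
--         start = i * step
--         result.append([start, end])
--         end = start - 1
--         i -= 1
--     result.reverse()
--     return result
-- ===== Notes on version B (the rewrite author's own statement) =====
-- stated objective: alternative
-- what changed: B builds the ranges back-to-front with a while loop whose only carried state is the current range's end, chained as end = start - 1 (then one reverse); the boundary array, its second indexing pass, and every (i+1)*step computation of A disappear.
import Mathlib
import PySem

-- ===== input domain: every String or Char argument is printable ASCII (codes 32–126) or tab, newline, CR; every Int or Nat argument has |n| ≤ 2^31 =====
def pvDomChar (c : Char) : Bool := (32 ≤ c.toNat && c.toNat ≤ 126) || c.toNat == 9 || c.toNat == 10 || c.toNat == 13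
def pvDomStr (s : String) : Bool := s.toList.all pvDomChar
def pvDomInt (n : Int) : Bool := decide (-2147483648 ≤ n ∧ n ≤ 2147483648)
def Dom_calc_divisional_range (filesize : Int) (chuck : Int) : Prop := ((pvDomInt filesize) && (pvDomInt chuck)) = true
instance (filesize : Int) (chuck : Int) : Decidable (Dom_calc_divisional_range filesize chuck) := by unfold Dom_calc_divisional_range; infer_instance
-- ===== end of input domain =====

-- B replaces A's two staged passes over a boundary array by one backward loop whose only
-- carried state is the current range's end (chained as end = start - 1), then a reverse.

-- ===== PORT A =====
-- Literal transliteration of A. 'chuck = 0' (ZeroDivisionError in Python) is excluded by Pre_.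
-- The pyGetD default 0 is never used: both indices are always in range of arr.
def calc_divisional_range (filesize : Int) (chuck : Int) : List (List Int) :=
  let step := PySem.Int.floordiv filesize chuck
  let arr := (PySem.List.pyRange 0 chuck 1).foldl (fun acc i => acc ++ [i * step]) []
  let arr := arr ++ [filesize]
  (PySem.List.pyRange 0 ((arr.length : Int) - 1) 1).foldl
    (fun res i => res ++ [[PySem.List.pyGetD arr i 0, PySem.List.pyGetD arr (i + 1) 0 - 1]]) []

-- ===== PORT B =====
-- The while loop of Source B: n counts the remaining iterations (i = n - 1 each time),
-- endPos is the carried 'end', res the list built back-to-front (appended, reversed at the end).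
def pvGoB (step : Int) : Nat → Int → List (List Int) → List (List Int)
  | 0, _, res => res
  | n + 1, endPos, res =>
      let start := (n : Int) * step
      pvGoB step n (start - 1) (res ++ [[start, endPos]])

def calc_divisional_range_alt (filesize : Int) (chuck : Int) : List (List Int) :=
  let step := PySem.Int.floordiv filesize chuck
  (pvGoB step chuck.toNat (filesize - 1) []).reverse

-- ===== PRECONDITION & SPEC =====
-- Python A raises ZeroDivisionError exactly when chuck = 0; B raises there too.
def Pre_calc_divisional_range (filesize : Int) (chuck : Int) : Prop := chuck ≠ 0
instance (filesize : Int) (chuck : Int) : Decidable (Pre_calc_divisional_range filesize chuck) := by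
  unfold Pre_calc_divisional_range; infer_instance
def pvWitness_calc_divisional_range : Int × Int := (100, 10)

def Spec_calc_divisional_range (filesize : Int) (chuck : Int) (out : List (List Int)) : Prop := out = calc_divisional_range_alt filesize chuck
instance (filesize : Int) (chuck : Int) (out : List (List Int)) : Decidable (Spec_calc_divisional_range filesize chuck out) := by unfold Spec_calc_divisional_range; infer_instance

-- ===== CLAIM =====
def Claim_equal_calc_divisional_range : Prop := ∀ (filesize : Int) (chuck : Int), Dom_calc_divisional_range filesize chuck → Pre_calc_divisional_range filesize chuck → Spec_calc_divisional_range filesize chuck (calc_divisional_range filesize chuck)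

-- ===== LEMMAS AND PROOFS =====

-- append-one-element foldl is map
theorem pv_foldl_append_map {α β : Type} (f : α → β) :
    ∀ (l : List α) (init : List β),
      l.foldl (fun acc i => acc ++ [f i]) init = init ++ l.map f := by
  intro l
  induction l with
  | nil => intro init; simp
  | cons x xs ih => intro init; simp [List.foldl, ih]

-- the boundary list arr, written as one map over range(chuck+1)
theorem pv_arr_eq (filesize chuck step : Int) (h : 0 < chuck) :
    ((PySem.List.pyRange 0 chuck 1).foldl (fun acc i => acc ++ [i * step]) []) ++ [filesize]
      = (PySem.List.pyRange 0 (chuck + 1) 1).map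
          (fun j => if j = chuck then filesize else j * step) := by
  rw [pv_foldl_append_map, PySem.List.pyRange_one_succ_right (a := 0) (b := chuck) (by omega),
      List.map_append, List.nil_append]
  congr 1
  · apply List.map_congr_left
    intro j hj
    rw [PySem.List.mem_pyRange_one] at hj
    rw [if_neg (by omega)]
  · simp

-- A as one map over range(chuck)
theorem pv_A_closed (filesize chuck : Int) (hpos : 0 < chuck) :
    calc_divisional_range filesize chuck
      = (PySem.List.pyRange 0 chuck 1).map (fun i =>
          [i * PySem.Int.floordiv filesize chuck,
           if i = chuck - 1 then filesize - 1
           else (i + 1) * PySem.Int.floordiv filesize chuck - 1]) := by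
  unfold calc_divisional_range
  dsimp only
  set step := PySem.Int.floordiv filesize chuck with hstep
  rw [pv_arr_eq filesize chuck step hpos, pv_foldl_append_map]
  have hlen : (((PySem.List.pyRange 0 (chuck + 1) 1).map
      (fun j => if j = chuck then filesize else j * step)).length : Int) - 1 = chuck := by
    simp [PySem.List.length_pyRange_one]
    omega
  rw [hlen]
  simp only [List.nil_append]
  apply List.map_congr_left
  intro i hi
  rw [PySem.List.mem_pyRange_one] at hi
  rw [PySem.List.pyGetD_map_pyRange_of_nonneg _ _ _ _ (by omega) (by omega),
      PySem.List.pyGetD_map_pyRange_of_nonneg _ _ _ _ (by omega) (by omega)]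
  by_cases hlast : i = chuck - 1
  · rw [if_neg (by omega), if_pos (by omega), if_pos hlast]
  · rw [if_neg (by omega), if_neg (by omega), if_neg hlast]

-- the backward loop produces the reversed range map
theorem pv_goB_closed (step : Int) :
    ∀ (n : Nat) (endPos : Int) (res : List (List Int)),
      pvGoB step n endPos res
        = res ++ ((List.range n).map (fun (k : Nat) =>
            [(k : Int) * step,
             if (k : Int) = (n : Int) - 1 then endPos else ((k : Int) + 1) * step - 1])).reverse := by
  intro n
  induction n with
  | zero => intro endPos res; simp [pvGoB]
  | succ m ih =>
      intro endPos res
      rw [pvGoB, ih]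
      rw [List.range_succ, List.map_append, List.reverse_append]
      simp only [List.map_cons, List.map_nil, List.reverse_cons, List.reverse_nil,
        List.nil_append, List.append_assoc]
      congr 2
      · rw [if_pos (by push_cast; ring)]
      · congr 1
        apply List.map_congr_left
        intro k hk
        rw [List.mem_range] at hk
        by_cases h1 : (k : Int) = (m : Int) - 1
        · have hk1 : ((k : Int) + 1) = (m : Int) := by omega
          rw [if_pos h1, if_neg (by omega), hk1]
        · rw [if_neg h1, if_neg (by omega)]

theorem calc_divisional_range_spec : Claim_equal_calc_divisional_range := by
  intro filesize chuck _ hpre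
  unfold Spec_calc_divisional_range calc_divisional_range_alt
  dsimp only
  set step := PySem.Int.floordiv filesize chuck with hstep
  by_cases hpos : 0 < chuck
  · rw [pv_A_closed filesize chuck hpos, pv_goB_closed, List.nil_append, List.reverse_reverse,
        PySem.List.pyRange_one (a := 0) (b := chuck)]
    rw [List.map_map]
    have htoNat : ((chuck.toNat : Int)) = chuck := Int.toNat_of_nonneg (by omega)
    rw [htoNat]
    simp only [sub_zero]
    apply List.map_congr_left
    intro k hk
    simp only [Function.comp_apply, zero_add, ← hstep]
  · -- chuck < 0: A's ranges are empty and B's loop runs zero times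
    unfold calc_divisional_range
    have h1 : PySem.List.pyRange 0 chuck 1 = [] :=
      PySem.List.pyRange_one_eq_nil (by omega)
    have h2 : chuck.toNat = 0 := by omega
    rw [h2]
    simp [h1, pvGoB, PySem.List.pyRange_one_eq_nil (a := 0) (b := 0) le_rfl]
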